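-- pv_equiv track=rewrite | github.com/AlmightyRice/A4 | A4.py | translate_to_pirate
-- ===== SOURCE A (Python) =====
-- def translate_pirate_word (word):
-- # pirate words list
--     pirate_words = {"my": "me","you": "ye","is": "be","are": "be","hello": "ahoy","yes": "arr","friend": "matey"}
--     if word in pirate_words:
--         return pirate_words[word]
--     else:
--         return word
--
-- def translate_to_pirate(sentence):
--     # Add a space to the end of the sentence
--     sentence += " "
--     translated_sentence = ""  # Initialize the translated sentence
--     current_word = ""  # Initialize the current word being built
--
--     # Loop over each character in the sentence
--     for char in sentence:
--         # If the character is a space, it indicates the end of a word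
--         if char == " ":
--             # Translate the current word using translate_pirate_word function
--             translated_word = translate_pirate_word(current_word)
--             # Add the translated word and a space to the translated sentence
--             translated_sentence += translated_word + " "
--             # Reset the current word for the next word
--             current_word = ""
--         else:
--             # Add the character to the current word being built
--             current_word += char
--
--     # Remove the trailing space and return the translated sentence
--     return translated_sentence[:-1]
-- ===== SOURCE B (Python) =====
-- def translate_pirate_word (word):
-- # pirate words list
--     pirate_words = {"my": "me","you": "ye","is": "be","are": "be","hello": "ahoy","yes": "arr","friend": "matey"}
--     if word in pirate_words:
--         return pirate_words[word]
--     else: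
--         return word
--
-- def translate_to_pirate(sentence):
--     # Tokenize on the literal single space (keeps empty tokens, so
--     # consecutive/leading/trailing spaces round-trip exactly), translate
--     # each token, and glue back together.
--     return " ".join(translate_pirate_word(word) for word in sentence.split(" "))
-- ===== Notes on version B (the rewrite author's own statement) =====
-- stated objective: idiomatic
-- what changed: Replaces the manual per-character word-building loop (with an appended sentinel space and a trailing-slice fixup) by single-space split / map / join over whole tokens.
import Mathlib
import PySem

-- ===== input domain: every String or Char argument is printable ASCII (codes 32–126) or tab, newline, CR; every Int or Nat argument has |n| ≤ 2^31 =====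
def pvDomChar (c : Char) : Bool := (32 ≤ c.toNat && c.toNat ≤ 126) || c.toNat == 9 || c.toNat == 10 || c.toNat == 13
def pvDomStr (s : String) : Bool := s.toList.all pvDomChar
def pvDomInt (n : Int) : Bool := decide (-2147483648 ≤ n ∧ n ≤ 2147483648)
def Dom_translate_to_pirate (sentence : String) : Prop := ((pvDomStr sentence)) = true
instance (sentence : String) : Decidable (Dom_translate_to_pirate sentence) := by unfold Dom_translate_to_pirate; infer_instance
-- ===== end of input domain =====

-- B replaces A's per-character word-building loop by split(" ")/map/" ".join; objective: more idiomatic, same cost.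

-- shared helper (identical in Source A and Source B): translate one word through the pirate dict
def pirate_words : PySem.Dict String String :=
  (((((((PySem.Dict.empty).insert "my" "me").insert "you" "ye").insert "is" "be").insert
      "are" "be").insert "hello" "ahoy").insert "yes" "arr").insert "friend" "matey"

def translate_pirate_word (word : String) : String :=
  if pirate_words.contains word then pirate_words.getD word word else word

-- ===== PORT A =====
-- loop state: (translated_sentence, current_word); characters processed one by one
def pvStepA (st : List Char × List Char) (c : Char) : List Char × List Char :=
  if c = ' ' then
    (st.1 ++ (translate_pirate_word (String.ofList st.2)).toList ++ [' '], [])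
  else
    (st.1, st.2 ++ [c])

def translate_to_pirate (sentence : String) : String :=
  let s := sentence.toList ++ [' ']            -- sentence += " "
  let r := s.foldl pvStepA ([], [])            -- the character loop
  String.ofList (PySem.List.slice r.1 none (some (-1)))   -- translated_sentence[:-1]

-- ===== PORT B =====
def translate_to_pirate_alt (sentence : String) : String :=
  String.ofList (PySem.Chars.join [' ']
    ((PySem.Chars.splitOn sentence.toList [' ']).map
      (fun w => (translate_pirate_word (String.ofList w)).toList)))

-- ===== PRECONDITION & SPEC =====
def Spec_translate_to_pirate (sentence : String) (out : String) : Prop := out = translate_to_pirate_alt sentence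
instance (sentence : String) (out : String) : Decidable (Spec_translate_to_pirate sentence out) := by unfold Spec_translate_to_pirate; infer_instance

-- ===== CLAIM (what is proved, stated in full; the proofs are below) =====
def Claim_equal_translate_to_pirate : Prop := ∀ (sentence : String), Dom_translate_to_pirate sentence → Spec_translate_to_pirate sentence (translate_to_pirate sentence)

-- ===== LEMMAS AND PROOFS =====

-- reference splitter: words l cur = the tokens of cur.reverse ++ l split on ' '
def pvWords : List Char → List Char → List (List Char)
  | [], cur => [cur.reverse]
  | c :: rest, cur => if c = ' ' then cur.reverse :: pvWords rest [] else pvWords rest (c :: cur)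

lemma pvSplitOn_go_eq : ∀ (fuel : Nat) (l cur : List Char) (acc : List (List Char)),
    l.length < fuel →
    PySem.Chars.splitOn.go [' '] fuel l cur acc = acc.reverse ++ pvWords l cur := by
  intro fuel
  induction fuel with
  | zero => intro l cur acc h; omega
  | succ n ih =>
    intro l cur acc h
    cases l with
    | nil => simp [PySem.Chars.splitOn.go, pvWords]
    | cons c rest =>
      simp only [PySem.Chars.splitOn.go, List.isPrefixOf, pvWords]
      by_cases hc : c = ' '
      · subst hc
        simp only [BEq.rfl, Bool.true_and, if_pos, List.length_nil, List.drop_zero,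
          List.length_cons, List.drop_succ_cons]
        rw [ih rest [] (cur.reverse :: acc) (by simpa using Nat.lt_of_succ_lt_succ h)]
        simp
      · have hb : (' ' == c) = false := by simp; intro hh; exact absurd hh.symm hc
        simp only [hb, Bool.false_and, Bool.false_eq_true, if_false, if_neg hc]
        rw [ih rest (c :: cur) acc (by simpa using Nat.lt_of_succ_lt_succ h)]

lemma pvSplitOn_eq_words (s : List Char) :
    PySem.Chars.splitOn s [' '] = pvWords s [] := by
  unfold PySem.Chars.splitOn
  rw [pvSplitOn_go_eq (s.length + 1) s [] [] (Nat.lt_succ_self _)]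
  simp

-- glue with a trailing space after each word (what A's loop emits)
def pvGlue : List (List Char) → List Char
  | [] => []
  | w :: ws => w ++ ' ' :: pvGlue ws

lemma pvGlue_ne_nil (w : List Char) (ws : List (List Char)) : pvGlue (w :: ws) ≠ [] := by
  cases w <;> simp [pvGlue]

lemma pvLoopA_eq : ∀ (cs ts cw : List Char),
    (List.foldl pvStepA (ts, cw) (cs ++ [' '])).1
      = ts ++ pvGlue ((pvWords cs cw.reverse).map
          (fun w => (translate_pirate_word (String.ofList w)).toList)) := by
  intro cs
  induction cs with
  | nil =>
    intro ts cw
    simp [pvStepA, pvWords, pvGlue]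
  | cons c rest ih =>
    intro ts cw
    by_cases hc : c = ' '
    · subst hc
      simp only [List.cons_append, List.foldl_cons, pvStepA]
      rw [ih]
      simp [pvWords, pvGlue]
    · simp only [List.cons_append, List.foldl_cons, pvStepA, if_neg hc]
      rw [ih]
      simp [pvWords, hc]

lemma pvGlue_dropLast : ∀ (ws : List (List Char)),
    (pvGlue ws).dropLast = PySem.Chars.join [' '] ws := by
  intro ws
  induction ws with
  | nil => simp [pvGlue, PySem.Chars.join_nil]
  | cons w ws ih =>
    cases ws with
    | nil => simp [pvGlue, PySem.Chars.join_singleton]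
    | cons w2 ws2 =>
      rw [PySem.Chars.join_cons_cons]
      have : pvGlue (w :: w2 :: ws2) = (w ++ [' ']) ++ pvGlue (w2 :: ws2) := by
        simp [pvGlue]
      rw [this, List.dropLast_append_of_ne_nil (pvGlue_ne_nil w2 ws2), ih]

-- ===== VERDICT (by name: the statement is the Claim_ definition above) =====
theorem translate_to_pirate_spec : Claim_equal_translate_to_pirate := by
  intro sentence _
  unfold Spec_translate_to_pirate translate_to_pirate translate_to_pirate_alt
  simp only [PySem.List.slice_to_neg_one]
  rw [pvLoopA_eq sentence.toList [] []]
  rw [pvSplitOn_eq_words]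
  simp [pvGlue_dropLast]
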